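-- pv_equiv track=rewrite | github.com/egallmann/ste-runtime | python-scripts/task_analysis.py | _detect_domain_hint
-- ===== SOURCE A (Python) =====
-- from typing import Dict, Iterable, List, Optional, Sequence, Tuple
--
-- def _detect_domain_hint(tokens: Sequence[str]) -> Optional[str]:
--     if any(tok in {"endpoint", "api", "route", "http"} for tok in tokens):
--         return "api"
--     if any(tok in {"entity", "model", "data"} for tok in tokens):
--         return "data"
--     if any(tok in {"module", "file", "component"} for tok in tokens):
--         return "graph"
--     return None
-- ===== SOURCE B (Python) =====
-- _KEYWORD_DOMAIN = {
--     "endpoint": "api", "api": "api", "route": "api", "http": "api",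
--     "entity": "data", "model": "data", "data": "data",
--     "module": "graph", "file": "graph", "component": "graph",
-- }
--
-- def _detect_domain_hint(tokens):
--     hit = set()
--     for tok in tokens:
--         cat = _KEYWORD_DOMAIN.get(tok)
--         if cat is not None:
--             hit.add(cat)
--     for cat in ("api", "data", "graph"):
--         if cat in hit:
--             return cat
--     return None
-- ===== Notes on version B (the rewrite author's own statement) =====
-- stated objective: alternative
-- what changed: Replaced three separate any-scans over the token list (one per hard-coded keyword set) by a single pass that looks each token up in one keyword-to-category dict, collecting the set of categories hit, followed by a fixed priority-order resolution (api, data, graph).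
import Mathlib
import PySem

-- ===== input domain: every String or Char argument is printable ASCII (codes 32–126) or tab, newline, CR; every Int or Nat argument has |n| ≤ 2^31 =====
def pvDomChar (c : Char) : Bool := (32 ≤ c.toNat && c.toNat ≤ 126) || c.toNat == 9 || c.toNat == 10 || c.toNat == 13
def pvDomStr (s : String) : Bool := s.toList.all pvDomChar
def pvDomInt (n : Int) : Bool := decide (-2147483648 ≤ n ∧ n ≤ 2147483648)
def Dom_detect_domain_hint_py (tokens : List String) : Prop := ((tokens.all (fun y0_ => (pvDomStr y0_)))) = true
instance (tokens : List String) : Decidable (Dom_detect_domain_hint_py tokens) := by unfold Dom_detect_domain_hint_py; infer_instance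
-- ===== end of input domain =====

-- B replaces A's three separate any-scans by one dict-indexed pass collecting the hit categories, then a fixed priority resolution; same values everywhere.

-- ===== PORT A =====
def detect_domain_hint_py (tokens : List String) : Option String :=
  if tokens.any (fun tok => PySem.Set.contains (PySem.Set.ofList ["endpoint", "api", "route", "http"]) tok) then some "api"
  else if tokens.any (fun tok => PySem.Set.contains (PySem.Set.ofList ["entity", "model", "data"]) tok) then some "data"
  else if tokens.any (fun tok => PySem.Set.contains (PySem.Set.ofList ["module", "file", "component"]) tok) then some "graph"
  else none

-- ===== PORT B =====
def pvKeywordDomain : PySem.Dict String String := PySem.Dict.mk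
  [("endpoint", "api"), ("api", "api"), ("route", "api"), ("http", "api"),
   ("entity", "data"), ("model", "data"), ("data", "data"),
   ("module", "graph"), ("file", "graph"), ("component", "graph")]

def detect_domain_hint_py_alt (tokens : List String) : Option String :=
  let hit : PySem.Set String := tokens.foldl
    (fun s tok => match pvKeywordDomain.get? tok with
      | some cat => PySem.Set.add s cat
      | none => s) PySem.Set.empty
  ["api", "data", "graph"].find? (fun cat => PySem.Set.contains hit cat)

-- ===== PRECONDITION & SPEC =====
def Spec_detect_domain_hint_py (tokens : List String) (out : Option String) : Prop := out = detect_domain_hint_py_alt tokens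
instance (tokens : List String) (out : Option String) : Decidable (Spec_detect_domain_hint_py tokens out) := by unfold Spec_detect_domain_hint_py; infer_instance

-- ===== CLAIM (what is proved, stated in full; the proofs are below) =====
def Claim_equal_detect_domain_hint_py : Prop := ∀ (tokens : List String), Dom_detect_domain_hint_py tokens → Spec_detect_domain_hint_py tokens (detect_domain_hint_py tokens)

-- ===== LEMMAS AND PROOFS =====

theorem mem_fold_hit (tokens : List String) (s : PySem.Set String) (c : String) :
    c ∈ tokens.foldl
      (fun s tok => match pvKeywordDomain.get? tok with
        | some cat => PySem.Set.add s cat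
        | none => s) s ↔
    c ∈ s ∨ ∃ t ∈ tokens, pvKeywordDomain.get? t = some c := by
  induction tokens generalizing s with
  | nil => simp
  | cons t ts ih =>
    simp only [List.foldl_cons, ih, List.mem_cons]
    cases h : pvKeywordDomain.get? t with
    | none =>
      constructor
      · rintro (hs | ⟨u, hu, hg⟩)
        · exact Or.inl hs
        · exact Or.inr ⟨u, Or.inr hu, hg⟩
      · rintro (hs | ⟨u, (rfl | hu), hg⟩)
        · exact Or.inl hs
        · simp [h] at hg
        · exact Or.inr ⟨u, hu, hg⟩
    | some cat =>
      simp only [PySem.Set.mem_add]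
      constructor
      · rintro ((hs | rfl) | ⟨u, hu, hg⟩)
        · exact Or.inl hs
        · exact Or.inr ⟨t, Or.inl rfl, h⟩
        · exact Or.inr ⟨u, Or.inr hu, hg⟩
      · rintro (hs | ⟨u, (rfl | hu), hg⟩)
        · exact Or.inl (Or.inl hs)
        · rw [h] at hg; exact Or.inl (Or.inr (Option.some_injective _ hg).symm)
        · exact Or.inr ⟨u, hu, hg⟩

theorem kw_api (t : String) :
    pvKeywordDomain.get? t = some "api" ↔ (t = "endpoint" ∨ t = "api" ∨ t = "route" ∨ t = "http") := by
  simp only [pvKeywordDomain, PySem.Dict.get?_mk_cons, beq_iff_eq]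
  split_ifs with h1 h2 h3 h4 h5 h6 h7 h8 h9 h10 <;> subst_vars <;> (try simp_all [PySem.Dict.get?, eq_comm])

theorem kw_data (t : String) :
    pvKeywordDomain.get? t = some "data" ↔ (t = "entity" ∨ t = "model" ∨ t = "data") := by
  simp only [pvKeywordDomain, PySem.Dict.get?_mk_cons, beq_iff_eq]
  split_ifs with h1 h2 h3 h4 h5 h6 h7 h8 h9 h10 <;> subst_vars <;> (try simp_all [PySem.Dict.get?, eq_comm])

theorem kw_graph (t : String) :
    pvKeywordDomain.get? t = some "graph" ↔ (t = "module" ∨ t = "file" ∨ t = "component") := by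
  simp only [pvKeywordDomain, PySem.Dict.get?_mk_cons, beq_iff_eq]
  split_ifs with h1 h2 h3 h4 h5 h6 h7 h8 h9 h10 <;> subst_vars <;> (try simp_all [PySem.Dict.get?, eq_comm])

-- ===== VERDICT (by name: the statement is the Claim_ definition above) =====
theorem detect_domain_hint_py_spec : Claim_equal_detect_domain_hint_py := by
  intro tokens _
  unfold Spec_detect_domain_hint_py detect_domain_hint_py detect_domain_hint_py_alt
  have hc : ∀ c : String,
      PySem.Set.contains (tokens.foldl
        (fun s tok => match pvKeywordDomain.get? tok with
          | some cat => PySem.Set.add s cat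
          | none => s) PySem.Set.empty) c = true ↔
      ∃ t ∈ tokens, pvKeywordDomain.get? t = some c := by
    intro c
    rw [PySem.Set.contains_iff, mem_fold_hit]
    simp [PySem.Set.empty]
  have ha : ∀ L : List String,
      ((tokens.any fun tok => PySem.Set.contains (PySem.Set.ofList L) tok) = true ↔
        ∃ t ∈ tokens, t ∈ L) := by
    intro L
    simp [List.any_eq_true, PySem.Set.mem_ofList]
  have e1 : (tokens.any fun tok => PySem.Set.contains (PySem.Set.ofList ["endpoint", "api", "route", "http"]) tok) =
      PySem.Set.contains (tokens.foldl
        (fun s tok => match pvKeywordDomain.get? tok with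
          | some cat => PySem.Set.add s cat
          | none => s) PySem.Set.empty) "api" := by
    rw [Bool.eq_iff_iff, ha, hc]
    simp only [kw_api, List.mem_cons, List.not_mem_nil, or_false]
  have e2 : (tokens.any fun tok => PySem.Set.contains (PySem.Set.ofList ["entity", "model", "data"]) tok) =
      PySem.Set.contains (tokens.foldl
        (fun s tok => match pvKeywordDomain.get? tok with
          | some cat => PySem.Set.add s cat
          | none => s) PySem.Set.empty) "data" := by
    rw [Bool.eq_iff_iff, ha, hc]
    simp only [kw_data, List.mem_cons, List.not_mem_nil, or_false]
  have e3 : (tokens.any fun tok => PySem.Set.contains (PySem.Set.ofList ["module", "file", "component"]) tok) =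
      PySem.Set.contains (tokens.foldl
        (fun s tok => match pvKeywordDomain.get? tok with
          | some cat => PySem.Set.add s cat
          | none => s) PySem.Set.empty) "graph" := by
    rw [Bool.eq_iff_iff, ha, hc]
    simp only [kw_graph, List.mem_cons, List.not_mem_nil, or_false]
  simp only [List.find?, e1, e2, e3]
  cases (tokens.foldl
      (fun s tok => match pvKeywordDomain.get? tok with
        | some cat => PySem.Set.add s cat
        | none => s) PySem.Set.empty).contains "api" <;>
    cases (tokens.foldl
        (fun s tok => match pvKeywordDomain.get? tok with
          | some cat => PySem.Set.add s cat
          | none => s) PySem.Set.empty).contains "data" <;>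
      cases (tokens.foldl
          (fun s tok => match pvKeywordDomain.get? tok with
            | some cat => PySem.Set.add s cat
            | none => s) PySem.Set.empty).contains "graph" <;>
        simp
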